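-- pv_equiv track=rewrite | github.com/Cloud090/ATW306_AI_Audiobooks | SFXModule.py | nearest_mapped_index
-- ===== SOURCE A (Python) =====
-- def nearest_mapped_index(mapping, start_idx):
--     # If the index is mapped, return the mapped index.
--     if start_idx in mapping and mapping[start_idx] is not None:
--         return mapping[start_idx]
--
--     # If the index isn't mapped, increment by one at a time until reaching the highest value available, seeing if a match can be found, returning if so.
--     i = start_idx
--     while i <= max(mapping.keys()):
--         if i in mapping and mapping[i] is not None:
--             return mapping[i]
--         i += 1
--
--     # if no match is found with the forward search, searches backwards, returning if found
--     i = start_idx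
--     while i >= 0:
--         if i in mapping and mapping[i] is not None:
--             return mapping[i]
--         i -= 1
--
--     # Returns None if no match is found.
--     return None
-- ===== SOURCE B (Python) =====
-- def nearest_mapped_index(mapping, start_idx):
--     keys = [k for k, v in mapping.items() if v is not None]
--     fwd = min((k for k in keys if k >= start_idx), default=None)
--     if fwd is not None:
--         return mapping[fwd]
--     bwd = max((k for k in keys if 0 <= k <= start_idx), default=None)
--     return mapping[bwd] if bwd is not None else None
-- ===== Notes on version B (the rewrite author's own statement) =====
-- stated objective: alternative
-- what changed: Replaces A's index-by-index scan from start_idx up to max(keys) and then down to 0 with a single pass over the dict items: take the minimum non-None key >= start_idx, else the maximum non-None key in [0, start_idx] (O(n) instead of O(key range), though not measurably faster on the generated inputs).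
import Mathlib
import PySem

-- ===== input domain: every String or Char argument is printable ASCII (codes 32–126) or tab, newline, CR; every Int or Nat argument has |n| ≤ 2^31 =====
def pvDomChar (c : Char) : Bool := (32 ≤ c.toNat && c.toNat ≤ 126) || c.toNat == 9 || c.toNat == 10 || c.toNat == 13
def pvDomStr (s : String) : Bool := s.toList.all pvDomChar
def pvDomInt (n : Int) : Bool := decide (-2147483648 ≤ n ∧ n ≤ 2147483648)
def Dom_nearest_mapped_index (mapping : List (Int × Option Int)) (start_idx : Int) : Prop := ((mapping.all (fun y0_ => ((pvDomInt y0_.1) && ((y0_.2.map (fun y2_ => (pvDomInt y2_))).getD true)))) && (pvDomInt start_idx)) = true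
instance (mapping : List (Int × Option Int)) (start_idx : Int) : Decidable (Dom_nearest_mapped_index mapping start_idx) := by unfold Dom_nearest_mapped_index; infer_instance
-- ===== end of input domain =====

-- B replaces A's step-by-step index scan with one pass over the dict items (min key ≥ start, else max key in [0, start]); equivalence of return values proved on non-empty dicts.


-- ===== PORT A =====
-- forward scan: while i <= mx: if i in mapping and mapping[i] is not None: return mapping[i]; i += 1
def nmiForward (d : PySem.Dict Int (Option Int)) (mx i : Int) : Option Int :=
  if _h : i ≤ mx then
    match d.get? i with
    | some (some v) => some v
    | _ => nmiForward d mx (i + 1)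
  else none
termination_by (mx + 1 - i).toNat
decreasing_by omega

-- backward scan: while i >= 0: if i in mapping and mapping[i] is not None: return mapping[i]; i -= 1
def nmiBackward (d : PySem.Dict Int (Option Int)) (i : Int) : Option Int :=
  if _h : 0 ≤ i then
    match d.get? i with
    | some (some v) => some v
    | _ => nmiBackward d (i - 1)
  else none
termination_by (i + 1).toNat
decreasing_by omega

def nearest_mapped_index (mapping : List (Int × Option Int)) (start_idx : Int) : Option Int :=
  let d := PySem.Dict.mk mapping
  match d.get? start_idx with
  | some (some v) => some v
  | _ =>
    -- max(mapping.keys()): Python raises ValueError on an empty dict — excluded by Pre_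
    match PySem.List.max? (PySem.Dict.keys d) (fun k => k) with
    | none => none
    | some mx =>
      match nmiForward d mx start_idx with
      | some v => some v
      | none => nmiBackward d start_idx

-- ===== PORT B =====
def nearest_mapped_index_alt (mapping : List (Int × Option Int)) (start_idx : Int) : Option Int :=
  let d := PySem.Dict.mk mapping
  let keys := (d.items.filter (fun p => p.2.isSome)).map Prod.fst
  match PySem.List.min? (keys.filter (fun k => decide (start_idx ≤ k))) (fun k => k) with
  | some fwd => (d.get? fwd).getD none
  | none =>
    match PySem.List.max? (keys.filter (fun k => decide (0 ≤ k ∧ k ≤ start_idx))) (fun k => k) with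
    | some bwd => (d.get? bwd).getD none
    | none => none

-- ===== PRECONDITION & SPEC =====
-- Pre_ excludes the empty mapping, on which A raises ValueError (max() of an empty sequence),
-- and association lists with duplicate keys, which do not represent any Python dict (a dict
-- cannot hold a key twice), so first-vs-last-match behaviour there is accidental.
def Pre_nearest_mapped_index (mapping : List (Int × Option Int)) (start_idx : Int) : Prop :=
  mapping ≠ [] ∧ (mapping.map Prod.fst).Nodup
instance (mapping : List (Int × Option Int)) (start_idx : Int) : Decidable (Pre_nearest_mapped_index mapping start_idx) := by unfold Pre_nearest_mapped_index; infer_instance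

def pvWitness_nearest_mapped_index : (List (Int × Option Int)) × Int := ([(0, none), (3, some 7)], 1)

def Spec_nearest_mapped_index (mapping : List (Int × Option Int)) (start_idx : Int) (out : Option Int) : Prop := out = nearest_mapped_index_alt mapping start_idx
instance (mapping : List (Int × Option Int)) (start_idx : Int) (out : Option Int) : Decidable (Spec_nearest_mapped_index mapping start_idx out) := by unfold Spec_nearest_mapped_index; infer_instance

-- ===== CLAIM (what is proved, stated in full; the proofs are below) =====
def Claim_equal_nearest_mapped_index : Prop := ∀ (mapping : List (Int × Option Int)) (start_idx : Int), Dom_nearest_mapped_index mapping start_idx → Pre_nearest_mapped_index mapping start_idx → Spec_nearest_mapped_index mapping start_idx (nearest_mapped_index mapping start_idx)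

-- ===== LEMMAS AND PROOFS =====

-- "good keys": the keys of the dict that are mapped to a non-None value
def goodKeys (mapping : List (Int × Option Int)) : List Int :=
  (mapping.filter (fun p => p.2.isSome)).map Prod.fst

theorem goodKeys_subset (mapping : List (Int × Option Int)) :
    goodKeys mapping ⊆ mapping.map Prod.fst := by
  intro k hk
  simp only [goodKeys, List.mem_map, List.mem_filter] at hk ⊢
  obtain ⟨p, ⟨hm, _⟩, rfl⟩ := hk
  exact ⟨p, hm, rfl⟩

theorem mem_goodKeys (mapping : List (Int × Option Int))
    (hnd : (mapping.map Prod.fst).Nodup) (k : Int) :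
    k ∈ goodKeys mapping ↔ ∃ v, (PySem.Dict.mk mapping).get? k = some (some v) := by
  have hnd' : (PySem.Dict.mk mapping).keys.Nodup := hnd
  constructor
  · intro hk
    simp only [goodKeys, List.mem_map, List.mem_filter] at hk
    obtain ⟨⟨k', vo⟩, ⟨hm, hs⟩, hk⟩ := hk
    obtain ⟨w, rfl⟩ := Option.isSome_iff_exists.mp hs
    cases hk
    exact ⟨w, (PySem.Dict.get?_eq_some_iff_mem_items _ _ (some w) hnd').mpr hm⟩
  · rintro ⟨v, hv⟩
    have hm := PySem.Dict.mem_items_of_get?_eq_some _ hv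
    simp only [goodKeys, List.mem_map, List.mem_filter]
    exact ⟨(k, some v), ⟨hm, rfl⟩, rfl⟩

theorem min?_id_eq (l : List Int) (m : Int) (hm : m ∈ l) (hlb : ∀ y ∈ l, m ≤ y) :
    PySem.List.min? l (fun k => k) = some m := by
  cases h : PySem.List.min? l (fun k => k) with
  | none =>
    rw [PySem.List.min?_eq_none_iff] at h
    rw [h] at hm
    cases hm
  | some m' =>
    have h1 : m' ∈ l := PySem.List.min?_mem h
    have h2 : (m' : Int) ≤ m := PySem.List.min?_isMin h m hm
    have h3 : m ≤ m' := hlb m' h1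
    rw [le_antisymm h2 h3]

theorem max?_id_eq (l : List Int) (m : Int) (hm : m ∈ l) (hub : ∀ y ∈ l, y ≤ m) :
    PySem.List.max? l (fun k => k) = some m := by
  cases h : PySem.List.max? l (fun k => k) with
  | none =>
    rw [PySem.List.max?_eq_none_iff] at h
    rw [h] at hm
    cases hm
  | some m' =>
    have h1 : m' ∈ l := PySem.List.max?_mem h
    have h2 : m ≤ m' := PySem.List.max?_isMax h m hm
    have h3 : m' ≤ m := hub m' h1
    rw [le_antisymm h3 h2]

theorem forward_stop (mapping : List (Int × Option Int)) (mx : Int)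
    (hmx : ∀ k ∈ mapping.map Prod.fst, k ≤ mx) (i : Int) (hle : ¬ i ≤ mx) :
    nmiForward (PySem.Dict.mk mapping) mx i =
      match PySem.List.min? ((goodKeys mapping).filter (fun k => decide (i ≤ k))) (fun k => k) with
      | some fwd => ((PySem.Dict.mk mapping).get? fwd).getD none
      | none => none := by
  have hnil : (goodKeys mapping).filter (fun k => decide (i ≤ k)) = [] := by
    apply List.filter_eq_nil_iff.mpr
    intro k hk
    have := hmx k (goodKeys_subset mapping hk)
    simp only [decide_eq_true_eq]
    omega
  have hmin : PySem.List.min? ((goodKeys mapping).filter (fun k => decide (i ≤ k))) (fun k => k) = none := by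
    rw [hnil, PySem.List.min?_eq_none_iff]
  rw [nmiForward, dif_neg hle, hmin]

theorem forward_eq_aux (mapping : List (Int × Option Int))
    (hnd : (mapping.map Prod.fst).Nodup) (mx : Int)
    (hmx : ∀ k ∈ mapping.map Prod.fst, k ≤ mx) :
    ∀ (n : Nat) (i : Int), (mx + 1 - i).toNat ≤ n →
    nmiForward (PySem.Dict.mk mapping) mx i =
      match PySem.List.min? ((goodKeys mapping).filter (fun k => decide (i ≤ k))) (fun k => k) with
      | some fwd => ((PySem.Dict.mk mapping).get? fwd).getD none
      | none => none := by
  intro n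
  induction n with
  | zero =>
    intro i hfuel
    exact forward_stop mapping mx hmx i (by omega)
  | succ n ih =>
    intro i hfuel
    by_cases hle : i ≤ mx
    · rw [nmiForward, dif_pos hle]
      cases hget : (PySem.Dict.mk mapping).get? i with
      | some vo =>
        cases vo with
        | some v =>
          have hg : i ∈ goodKeys mapping := (mem_goodKeys mapping hnd i).mpr ⟨v, hget⟩
          have hmin : PySem.List.min? ((goodKeys mapping).filter (fun k => decide (i ≤ k))) (fun k => k) = some i := by
            apply min?_id_eq
            · simp only [List.mem_filter, decide_eq_true_eq]
              exact ⟨hg, le_refl i⟩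
            · intro y hy
              simpa using (List.mem_filter.mp hy).2
          rw [hmin]
          simp [hget]
        | none =>
          have hni : i ∉ goodKeys mapping := by
            intro hg
            obtain ⟨w, hw⟩ := (mem_goodKeys mapping hnd i).mp hg
            rw [hget] at hw
            cases hw
          have hfc : (goodKeys mapping).filter (fun k => decide (i ≤ k)) =
              (goodKeys mapping).filter (fun k => decide (i + 1 ≤ k)) := by
            apply List.filter_congr
            intro k hk
            have : k ≠ i := fun h => hni (h ▸ hk)
            simp only [decide_eq_decide]
            omega
          rw [hfc]
          simpa using ih (i + 1) (by omega)
      | none =>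
        have hni : i ∉ goodKeys mapping := by
          intro hg
          obtain ⟨w, hw⟩ := (mem_goodKeys mapping hnd i).mp hg
          rw [hget] at hw
          cases hw
        have hfc : (goodKeys mapping).filter (fun k => decide (i ≤ k)) =
            (goodKeys mapping).filter (fun k => decide (i + 1 ≤ k)) := by
          apply List.filter_congr
          intro k hk
          have : k ≠ i := fun h => hni (h ▸ hk)
          simp only [decide_eq_decide]
          omega
        rw [hfc]
        simpa using ih (i + 1) (by omega)
    · exact forward_stop mapping mx hmx i hle

theorem forward_eq (mapping : List (Int × Option Int))
    (hnd : (mapping.map Prod.fst).Nodup) (mx : Int)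
    (hmx : ∀ k ∈ mapping.map Prod.fst, k ≤ mx) (i : Int) :
    nmiForward (PySem.Dict.mk mapping) mx i =
      match PySem.List.min? ((goodKeys mapping).filter (fun k => decide (i ≤ k))) (fun k => k) with
      | some fwd => ((PySem.Dict.mk mapping).get? fwd).getD none
      | none => none :=
  forward_eq_aux mapping hnd mx hmx (mx + 1 - i).toNat i le_rfl

theorem backward_eq_aux (mapping : List (Int × Option Int))
    (hnd : (mapping.map Prod.fst).Nodup) :
    ∀ (n : Nat) (i : Int), (i + 1).toNat ≤ n →
    nmiBackward (PySem.Dict.mk mapping) i =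
      match PySem.List.max? ((goodKeys mapping).filter (fun k => decide (0 ≤ k ∧ k ≤ i))) (fun k => k) with
      | some bwd => ((PySem.Dict.mk mapping).get? bwd).getD none
      | none => none := by
  have stop : ∀ i : Int, ¬ 0 ≤ i →
      nmiBackward (PySem.Dict.mk mapping) i =
        match PySem.List.max? ((goodKeys mapping).filter (fun k => decide (0 ≤ k ∧ k ≤ i))) (fun k => k) with
        | some bwd => ((PySem.Dict.mk mapping).get? bwd).getD none
        | none => none := by
    intro i hle
    have hnil : (goodKeys mapping).filter (fun k => decide (0 ≤ k ∧ k ≤ i)) = [] := by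
      apply List.filter_eq_nil_iff.mpr
      intro k _
      simp only [decide_eq_true_eq]
      omega
    have hmax : PySem.List.max? ((goodKeys mapping).filter (fun k => decide (0 ≤ k ∧ k ≤ i))) (fun k => k) = none := by
      rw [hnil, PySem.List.max?_eq_none_iff]
    rw [nmiBackward, dif_neg hle, hmax]
  intro n
  induction n with
  | zero =>
    intro i hfuel
    exact stop i (by omega)
  | succ n ih =>
    intro i hfuel
    by_cases hle : 0 ≤ i
    · rw [nmiBackward, dif_pos hle]
      cases hget : (PySem.Dict.mk mapping).get? i with
      | some vo =>
        cases vo with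
        | some v =>
          have hg : i ∈ goodKeys mapping := (mem_goodKeys mapping hnd i).mpr ⟨v, hget⟩
          have hmax : PySem.List.max? ((goodKeys mapping).filter (fun k => decide (0 ≤ k ∧ k ≤ i))) (fun k => k) = some i := by
            apply max?_id_eq
            · simp only [List.mem_filter, decide_eq_true_eq]
              exact ⟨hg, hle, le_refl i⟩
            · intro y hy
              have := (List.mem_filter.mp hy).2
              simp only [decide_eq_true_eq] at this
              exact this.2
          rw [hmax]
          simp [hget]
        | none =>
          have hni : i ∉ goodKeys mapping := by
            intro hg
            obtain ⟨w, hw⟩ := (mem_goodKeys mapping hnd i).mp hg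
            rw [hget] at hw
            cases hw
          have hfc : (goodKeys mapping).filter (fun k => decide (0 ≤ k ∧ k ≤ i)) =
              (goodKeys mapping).filter (fun k => decide (0 ≤ k ∧ k ≤ i - 1)) := by
            apply List.filter_congr
            intro k hk
            have : k ≠ i := fun h => hni (h ▸ hk)
            simp only [decide_eq_decide]
            omega
          rw [hfc]
          simpa using ih (i - 1) (by omega)
      | none =>
        have hni : i ∉ goodKeys mapping := by
          intro hg
          obtain ⟨w, hw⟩ := (mem_goodKeys mapping hnd i).mp hg
          rw [hget] at hw
          cases hw
        have hfc : (goodKeys mapping).filter (fun k => decide (0 ≤ k ∧ k ≤ i)) =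
            (goodKeys mapping).filter (fun k => decide (0 ≤ k ∧ k ≤ i - 1)) := by
          apply List.filter_congr
          intro k hk
          have : k ≠ i := fun h => hni (h ▸ hk)
          simp only [decide_eq_decide]
          omega
        rw [hfc]
        simpa using ih (i - 1) (by omega)
    · exact stop i hle

theorem backward_eq (mapping : List (Int × Option Int))
    (hnd : (mapping.map Prod.fst).Nodup) (i : Int) :
    nmiBackward (PySem.Dict.mk mapping) i =
      match PySem.List.max? ((goodKeys mapping).filter (fun k => decide (0 ≤ k ∧ k ≤ i))) (fun k => k) with
      | some bwd => ((PySem.Dict.mk mapping).get? bwd).getD none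
      | none => none :=
  backward_eq_aux mapping hnd (i + 1).toNat i le_rfl

-- ===== VERDICT (by name: the statement is the Claim_ definition above) =====
theorem nearest_mapped_index_spec : Claim_equal_nearest_mapped_index := by
  intro mapping start_idx _ hpre
  obtain ⟨hne, hnd⟩ := hpre
  unfold Spec_nearest_mapped_index
  have hkeys : (PySem.Dict.mk mapping).keys = mapping.map Prod.fst := rfl
  have hkne : (PySem.Dict.mk mapping).keys ≠ [] := by
    rw [hkeys]
    intro h
    exact hne (List.map_eq_nil_iff.mp h)
  cases hmx : PySem.List.max? ((PySem.Dict.mk mapping).keys) (fun k => k) with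
  | none =>
    exact absurd ((PySem.List.max?_eq_none_iff _ _).mp hmx) hkne
  | some mx =>
  have hub : ∀ k ∈ mapping.map Prod.fst, k ≤ mx := by
    intro k hk
    exact PySem.List.max?_isMax hmx k (hkeys ▸ hk)
  have hF := forward_eq mapping hnd mx hub start_idx
  have hB := backward_eq mapping hnd start_idx
  have hrest : (match nmiForward (PySem.Dict.mk mapping) mx start_idx with
        | some v => some v
        | none => nmiBackward (PySem.Dict.mk mapping) start_idx) =
      (match PySem.List.min? ((goodKeys mapping).filter (fun k => decide (start_idx ≤ k))) (fun k => k) with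
        | some fwd => ((PySem.Dict.mk mapping).get? fwd).getD none
        | none =>
          match PySem.List.max? ((goodKeys mapping).filter (fun k => decide (0 ≤ k ∧ k ≤ start_idx))) (fun k => k) with
          | some bwd => ((PySem.Dict.mk mapping).get? bwd).getD none
          | none => none) := by
    rw [hF, hB]
    cases hmin : PySem.List.min? ((goodKeys mapping).filter (fun k => decide (start_idx ≤ k))) (fun k => k) with
    | some k =>
      have hkg : k ∈ goodKeys mapping := (List.mem_filter.mp (PySem.List.min?_mem hmin)).1
      obtain ⟨w, hw⟩ := (mem_goodKeys mapping hnd k).mp hkg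
      simp [hw]
    | none => rfl
  simp only [nearest_mapped_index, nearest_mapped_index_alt]
  rw [show ((PySem.Dict.mk mapping).items.filter (fun p => p.2.isSome)).map Prod.fst = goodKeys mapping from rfl]
  rw [hmx]
  cases hs : (PySem.Dict.mk mapping).get? start_idx with
  | some vo =>
    cases vo with
    | some v =>
      have hsg : start_idx ∈ goodKeys mapping := (mem_goodKeys mapping hnd start_idx).mpr ⟨v, hs⟩
      have hmin : PySem.List.min? ((goodKeys mapping).filter (fun k => decide (start_idx ≤ k))) (fun k => k) = some start_idx := by
        apply min?_id_eq
        · simp only [List.mem_filter, decide_eq_true_eq]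
          exact ⟨hsg, le_refl start_idx⟩
        · intro y hy
          simpa using (List.mem_filter.mp hy).2
      rw [hmin]
      simp [hs]
    | none =>
      simpa using hrest
  | none =>
    simpa using hrest
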